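/-
  THE FIXED jsmn_parse: what the two wrappers' proofs (Fixed/D/ParseCheck.lean, Fixed/S/ParseCheck.lean) share.
    argsOk_none_iff / argsOk_default_iff / argsOk_links_iff     the check (`Jsmn.argsOk`) as plain arithmetic, case by case as the code branches
    parseFixed_fail / parseFixed_pass                           the two branches of `Jsmn.parseFixed`
    region_sub, env_sub                                         the wrapper's data regions are the body's (its stack window is the wrapper's minus the `call`'s 8 bytes)
-/
import Prog.Jsmn.Fixed.Specs
import Prog.Jsmn.State

namespace X86
namespace J6
namespace Fx
open X86.User (CodeAt RegsKept Span FlagsOK Layout toNat_add_ofNat toNat_ofNat_lt' add_ofNat_add)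
open Jsmn

set_option linter.unusedVariables false

/-- Counting mode (`tokens == NULL`): only the first `if`. -/
theorem argsOk_none_iff (cfg : Jsmn.Config) (len : Nat) (p : Parser) (n : Nat) :
    argsOk cfg len p none n = true ↔ (len ≤ 2147483647 ∧ p.toknext ≤ 2147483647 - len) := by
  simp [argsOk]

/-- The default configuration with a token array: the first `if`, then `num_tokens`, `toknext`, `toksuper ∈ [-1, num_tokens)`. -/
theorem argsOk_default_iff (len : Nat) (p : Parser) (ts : Tokens) (n : Nat) :
    argsOk Config.default len p (some ts) n = true ↔
      (len ≤ 2147483647 ∧ p.toknext ≤ 2147483647 - len ∧ n ≤ 2147483647 ∧ p.toknext ≤ n ∧ -1 ≤ p.toksuper ∧ p.toksuper < (n : Int)) := by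
  simp [argsOk, links_default, and_assoc]

/-- With parent links: `toksuper ∈ [-1, toknext)` and the loop over the allocated tokens' parents. -/
theorem argsOk_links_iff (len : Nat) (p : Parser) (ts : Tokens) (n : Nat) :
    argsOk Config.strictLinks len p (some ts) n = true ↔
      (len ≤ 2147483647 ∧ p.toknext ≤ 2147483647 - len ∧ n ≤ 2147483647 ∧ p.toknext ≤ n ∧ -1 ≤ p.toksuper ∧ p.toksuper < (p.toknext : Int) ∧
        linksOk ts p.toknext = true) := by
  simp [argsOk, links_strictLinks, and_assoc]

/-- A failed check: JSMN_ERROR_INVAL, nothing touched. -/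
theorem parseFixed_fail {cfg : Jsmn.Config} {js : List UInt8} {p : Parser} {toks : Option Tokens} {n : Nat}
    (h : ¬ argsOk cfg js.length p toks n = true) : parseFixed cfg js p toks n = some (JSMN_ERROR_INVAL, p, toks) := by
  simp [parseFixed, h]

/-- A passed check: the original function, with `js.length + 1` units of fuel. -/
theorem parseFixed_pass {cfg : Jsmn.Config} {js : List UInt8} {p : Parser} {toks : Option Tokens} {n : Nat}
    (h : argsOk cfg js.length p toks n = true) : parseFixed cfg js p toks n = parseFuel cfg (js.length + 1) js p toks n := by
  simp [parseFixed, h, parse]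

/-- The loop of the check, one step: `linksOk ts (k + 1)` is `linksOk ts k` and the test of `tokens[k].parent`. -/
theorem linksOk_succ (ts : Tokens) (k : Nat) :
    linksOk ts (k + 1) = true ↔ (linksOk ts k = true ∧ -1 ≤ (ts.getD k default).parent ∧ (ts.getD k default).parent < (k : Int)) := by
  rw [linksOk_iff, linksOk_iff]
  constructor
  · intro h
    exact ⟨fun i hi => h i (by omega), h k (by omega)⟩
  · intro ⟨h1, h2⟩ i hi
    by_cases e : i = k
    · subst e; exact h2
    · exact h1 i (by omega)

theorem linksOk_zero (ts : Tokens) : linksOk ts 0 = true := by simp [linksOk]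

/-- A token whose parent fails the test: the whole check fails. -/
theorem linksOk_false (ts : Tokens) (k m : Nat) (hk : k < m) (h : ¬ (-1 ≤ (ts.getD k default).parent ∧ (ts.getD k default).parent < (k : Int))) :
    ¬ linksOk ts m = true := by
  intro hm
  exact h ((linksOk_iff ts m).mp hm k hk)

/-- A data region of the wrapper is a data region of the body it calls: the body's stack window `[rsp' - use', rsp')` with `rsp' = rsp - 8` and
`use' + 8 ≤ use` lies inside the wrapper's. -/
theorem region_sub {b b' : Bin} {n : User.Layout} {v0 v1 : User.State} {use use' : Nat} {a : Word} {len : Nat} (h : Region b n v0 use a len)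
    (himg : b'.image.length = b.image.length) (hrsp : (v1.reg .rsp).toNat + 8 = (v0.reg .rsp).toNat) (huse : use' + 8 ≤ use) :
    Region b' n v1 use' a len := by
  refine ⟨h.lo, h.hi, by rw [himg]; exact h.img, ?_⟩
  have := h.stk
  omega

/-- The three buffers, as the body sees them. -/
theorem env_sub {b b' : Bin} {n : User.Layout} {v0 v1 : User.State} {use use' : Nat} {pa jsA tb : Word} {len tlen : Nat} (h : Env b n v0 use pa jsA len tb tlen)
    (himg : b'.image.length = b.image.length) (hrsp : (v1.reg .rsp).toNat + 8 = (v0.reg .rsp).toNat) (huse : use' + 8 ≤ use) :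
    Env b' n v1 use' pa jsA len tb tlen :=
  ⟨region_sub h.parserR himg hrsp huse, region_sub h.jsR himg hrsp huse, h.toksR.imp_right fun hR => region_sub hR himg hrsp huse, h.parserJs,
    h.parserToks, h.jsToks⟩

end Fx
end J6
end X86
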